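-- pv_equiv track=rewrite | github.com/bangca85/python-for-kid | basic/buoi22/bai2.py | find_top_scorer
-- ===== SOURCE A (Python) =====
-- def find_top_scorer(team_goals):
--     top_team = None
--     max_goals = 0
--     for team, goals in team_goals.items():
--         if goals > max_goals:
--             max_goals = goals
--             top_team = team
--     return top_team
-- ===== SOURCE B (Python) =====
-- def find_top_scorer(team_goals):
--     best = max(team_goals.values(), default=0)
--     if best <= 0:
--         return None
--     for team, goals in team_goals.items():
--         if goals == best:
--             return team
-- ===== Notes on version B (the rewrite author's own statement) =====
-- stated objective: idiomatic
-- what changed: Replaces A's single-pass running-max accumulator over (team, goals) pairs with the builtin max over the values (default 0) followed by a first-match scan for that value.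
import Mathlib
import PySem

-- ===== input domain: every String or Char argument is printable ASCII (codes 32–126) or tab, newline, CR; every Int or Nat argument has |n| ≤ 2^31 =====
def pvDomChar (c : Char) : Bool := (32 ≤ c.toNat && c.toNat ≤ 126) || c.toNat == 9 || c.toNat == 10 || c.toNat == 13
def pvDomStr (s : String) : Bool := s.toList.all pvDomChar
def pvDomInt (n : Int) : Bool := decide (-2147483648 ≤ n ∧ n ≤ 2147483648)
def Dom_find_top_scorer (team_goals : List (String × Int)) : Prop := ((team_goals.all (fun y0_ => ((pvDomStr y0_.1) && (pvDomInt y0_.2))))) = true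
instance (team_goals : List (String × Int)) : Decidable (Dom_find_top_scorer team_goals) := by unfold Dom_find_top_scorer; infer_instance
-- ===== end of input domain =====

-- B (idiomatic, same cost): builtin max over the values (default 0), then a first-match scan,
-- instead of A's manual running-max accumulator; returns None when no team has positive goals.
-- ===== PORT A =====
-- Port of A: accumulator scan keeping (top_team, max_goals), updated on strictly greater goals.
def find_top_scorer (team_goals : List (String × Int)) : Option String :=
  (team_goals.foldl (fun s p => if p.2 > s.2 then (some p.1, p.2) else s)
    ((none : Option String), (0 : Int))).1

-- ===== PORT B =====
-- B: best = max(values, default=0); None if best <= 0; else first team with that many goals.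
def findTeamWithGoals (best : Int) : List (String × Int) → Option String
  | [] => none
  | (team, goals) :: rest => if goals = best then some team else findTeamWithGoals best rest

def find_top_scorer_alt (team_goals : List (String × Int)) : Option String :=
  let best := PySem.List.maxD (team_goals.map (fun p => p.2)) (fun v => v) 0
  if best ≤ 0 then none else findTeamWithGoals best team_goals

-- ===== PRECONDITION & SPEC =====
def Spec_find_top_scorer (team_goals : List (String × Int)) (out : Option String) : Prop := out = find_top_scorer_alt team_goals
instance (team_goals : List (String × Int)) (out : Option String) : Decidable (Spec_find_top_scorer team_goals out) := by unfold Spec_find_top_scorer; infer_instance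

-- ===== CLAIM (what is proved, stated in full; the proofs are below) =====
def Claim_equal_find_top_scorer : Prop := ∀ (team_goals : List (String × Int)), Dom_find_top_scorer team_goals → Spec_find_top_scorer team_goals (find_top_scorer team_goals)

-- ===== LEMMAS AND PROOFS =====

-- running maximum of a list of values, as A's loop computes it
def valsMax (m : Int) : List Int → Int
  | [] => m
  | v :: rest => valsMax (if v > m then v else m) rest

lemma le_valsMax : ∀ (vs : List Int) (m : Int), m ≤ valsMax m vs := by
  intro vs
  induction vs with
  | nil => intro m; simp [valsMax]
  | cons v rest ih =>
    intro m
    simp only [valsMax]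
    by_cases hv : v > m
    · rw [if_pos hv]; exact le_trans (le_of_lt hv) (ih v)
    · rw [if_neg hv]; exact ih m

lemma valsMax_max : ∀ (vs : List Int) (a b : Int),
    valsMax (max a b) vs = max (valsMax a vs) b := by
  intro vs
  induction vs with
  | nil => intro a b; simp [valsMax]
  | cons v rest ih =>
    intro a b
    have key : (if v > max a b then v else max a b) = max (if v > a then v else a) b := by
      simp only [max_def]; split_ifs <;> omega
    simp only [valsMax, key, ih]

lemma max?_cons_eq_valsMax : ∀ (rest : List Int) (a : Int),
    PySem.List.max? (a :: rest) (fun x => x) = some (valsMax a rest) := by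
  intro rest
  induction rest with
  | nil => intro a; rfl
  | cons v vs ih =>
    intro a
    have h1 := ih (if v > a then v else a)
    simp only [PySem.List.max?, List.foldl] at h1 ⊢
    simp only [valsMax]
    by_cases h : a < v
    · simpa [h] using h1
    · simpa [h, show ¬ v > a from h] using h1

lemma foldA_eq : ∀ (xs : List (String × Int)) (t : Option String) (m : Int),
    List.foldl (fun s p => if p.2 > s.2 then (some p.1, p.2) else s) (t, m) xs
    = (if m < valsMax m (xs.map (fun p => p.2))
         then findTeamWithGoals (valsMax m (xs.map (fun p => p.2))) xs else t,
       valsMax m (xs.map (fun p => p.2))) := by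
  intro xs
  induction xs with
  | nil => intro t m; simp [valsMax]
  | cons p rest ih =>
    intro t m
    obtain ⟨s, g⟩ := p
    simp only [List.foldl, List.map, valsMax]
    by_cases h : g > m
    · simp only [h, if_pos]
      rw [ih (some s) g]
      have hG : g ≤ valsMax g (rest.map (fun p => p.2)) := le_valsMax _ g
      have hm : m < valsMax g (rest.map (fun p => p.2)) := lt_of_lt_of_le h hG
      simp only [hm, if_pos]
      by_cases he : g = valsMax g (rest.map (fun p => p.2))
      · rw [← he]
        simp [findTeamWithGoals]
      · have hlt : g < valsMax g (rest.map (fun p => p.2)) := lt_of_le_of_ne hG he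
        simp [findTeamWithGoals, he, hlt]
    · simp only [h, if_neg, not_false_iff]
      rw [ih t m]
      by_cases hm : m < valsMax m (rest.map (fun p => p.2))
      · have hne : ¬ g = valsMax m (rest.map (fun p => p.2)) := by omega
        simp [hm, findTeamWithGoals, hne]
      · simp [hm]


-- ===== VERDICT (by name: the statement is the Claim_ definition above) =====
theorem find_top_scorer_spec : Claim_equal_find_top_scorer := by
  intro tg _
  unfold Spec_find_top_scorer find_top_scorer find_top_scorer_alt
  rw [foldA_eq tg none 0]
  cases tg with
  | nil => simp [valsMax, PySem.List.maxD, PySem.List.max?]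
  | cons p rest =>
    have hmax : PySem.List.maxD ((p :: rest).map (fun q => q.2)) (fun v => v) 0
        = valsMax p.2 (rest.map (fun q => q.2)) := by
      simp only [PySem.List.maxD, List.map]
      rw [max?_cons_eq_valsMax]
      rfl
    have hvm : valsMax 0 ((p :: rest).map (fun q => q.2))
        = max (valsMax p.2 (rest.map (fun q => q.2))) 0 := by
      simp only [List.map, valsMax]
      have : (if p.2 > 0 then p.2 else (0 : Int)) = max p.2 0 := by
        simp only [max_def]; split_ifs <;> omega
      rw [this, valsMax_max]
    rw [hmax, hvm]
    by_cases hb : valsMax p.2 (rest.map (fun q => q.2)) ≤ 0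
    · have h0 : max (valsMax p.2 (rest.map (fun q => q.2))) 0 = 0 := max_eq_right hb
      rw [h0]
      simp [hb]
    · have h2 : max (valsMax p.2 (rest.map (fun q => q.2))) 0
          = valsMax p.2 (rest.map (fun q => q.2)) := max_eq_left (by omega)
      have h1 : (0:Int) < valsMax p.2 (rest.map (fun q => q.2)) := by omega
      simp [hb, h1, h2]
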